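-- pv_equiv track=rewrite | github.com/ravichalla/livecoding | coding_patterns/algotest-3.py | getCountAndFirstYPos
-- ===== SOURCE A (Python) =====
-- def getCountAndFirstYPos(pattern , pattern_dict):
--
--     YPosNotSet = True
--     firstYPos = None
--     for i, char in enumerate(pattern):
--         if YPosNotSet and char == 'y':
--             firstYPos = i
--             YPosNotSet = False
--         if char not in pattern_dict:
--             pattern_dict[char] = 0
--         pattern_dict[char] += 1
--     return pattern_dict, firstYPos
-- ===== SOURCE B (Python) =====
-- def getCountAndFirstYPos(pattern, pattern_dict):
--     idx = pattern.find('y')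
--     firstYPos = None if idx == -1 else idx
--     counts = {}
--     for ch in pattern:
--         counts[ch] = counts.get(ch, 0) + 1
--     for ch, n in counts.items():
--         pattern_dict[ch] = pattern_dict.get(ch, 0) + n
--     return pattern_dict, firstYPos
-- ===== Notes on version B (the rewrite author's own statement) =====
-- stated objective: alternative
-- what changed: A's single loop that interleaves first-'y' flag tracking with setdefault-style per-occurrence increments is replaced by str.find for the 'y' position plus a Counter-style counting pass whose totals are merged into pattern_dict in a second pass.
import Mathlib
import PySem

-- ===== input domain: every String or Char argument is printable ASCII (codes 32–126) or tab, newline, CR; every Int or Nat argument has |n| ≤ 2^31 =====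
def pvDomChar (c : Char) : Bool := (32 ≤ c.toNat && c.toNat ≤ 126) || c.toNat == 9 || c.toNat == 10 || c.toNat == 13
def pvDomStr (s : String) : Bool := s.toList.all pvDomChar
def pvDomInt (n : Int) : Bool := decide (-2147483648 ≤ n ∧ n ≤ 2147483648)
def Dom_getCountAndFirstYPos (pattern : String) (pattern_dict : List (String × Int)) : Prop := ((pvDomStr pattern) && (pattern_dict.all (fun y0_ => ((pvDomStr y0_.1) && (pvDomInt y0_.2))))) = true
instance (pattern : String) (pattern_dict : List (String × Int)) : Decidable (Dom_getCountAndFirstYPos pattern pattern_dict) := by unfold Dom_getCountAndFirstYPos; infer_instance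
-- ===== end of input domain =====

-- B replaces A's single interleaved loop (flag-tracked first-'y' + setdefault-increment counting)
-- by str.find for the 'y' position plus a Counter-style count pass merged into pattern_dict (objective: alternative).
-- Note: both Pythons mutate pattern_dict in place identically; the equivalence proved is about the return value.


-- ===== PORT A =====
-- a char used as a dict key is a length-1 Python string
def pvStr1 (c : Char) : String := String.ofList [c]

-- the y-tracking part of A's loop body: 'if YPosNotSet and char == 'y': firstYPos = i; YPosNotSet = False'
def pvAStepY (s : Option Int × Bool) (p : Int × Char) : Option Int × Bool :=
  if s.2 && (p.2 == 'y') then (some p.1, false) else s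

-- the counting part of A's loop body: 'if char not in pattern_dict: pattern_dict[char] = 0' then
-- 'pattern_dict[char] += 1' (the key is present at that point, so getD _ 0 reads the exact value)
def pvAStepD (d : PySem.Dict String Int) (c : Char) : PySem.Dict String Int :=
  let d := if d.contains (pvStr1 c) = false then d.insert (pvStr1 c) 0 else d
  d.insert (pvStr1 c) (d.getD (pvStr1 c) 0 + 1)

def getCountAndFirstYPos (pattern : String) (pattern_dict : List (String × Int)) : (List (String × Int)) × Option Int :=
  let st := (PySem.List.enumerate pattern.toList 0).foldl
    (fun st p => (pvAStepD st.1 p.2, pvAStepY st.2 p))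
    (PySem.Dict.mk pattern_dict, ((none : Option Int), true))
  (st.1.items, st.2.1)

-- ===== PORT B =====
def getCountAndFirstYPos_alt (pattern : String) (pattern_dict : List (String × Int)) : (List (String × Int)) × Option Int :=
  let idx := PySem.Str.find pattern "y"
  let firstYPos : Option Int := if idx == -1 then none else some idx
  let counts : PySem.Dict String Int :=
    pattern.toList.foldl (fun d ch => d.insert (pvStr1 ch) (d.getD (pvStr1 ch) 0 + 1)) PySem.Dict.empty
  let d := counts.items.foldl (fun d p => d.insert p.1 (d.getD p.1 0 + p.2)) (PySem.Dict.mk pattern_dict)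
  (d.items, firstYPos)

-- ===== PRECONDITION & SPEC =====
def Spec_getCountAndFirstYPos (pattern : String) (pattern_dict : List (String × Int)) (out : (List (String × Int)) × Option Int) : Prop := out = getCountAndFirstYPos_alt pattern pattern_dict
instance (pattern : String) (pattern_dict : List (String × Int)) (out : (List (String × Int)) × Option Int) : Decidable (Spec_getCountAndFirstYPos pattern pattern_dict out) := by unfold Spec_getCountAndFirstYPos; infer_instance

-- ===== CLAIM (what is proved, stated in full; the proofs are below) =====
def Claim_equal_getCountAndFirstYPos : Prop := ∀ (pattern : String) (pattern_dict : List (String × Int)), Dom_getCountAndFirstYPos pattern pattern_dict → Spec_getCountAndFirstYPos pattern pattern_dict (getCountAndFirstYPos pattern pattern_dict)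

-- ===== LEMMAS AND PROOFS =====

-- A's combined fold splits into an independent dict fold and y fold
theorem pv_split (L : List Char) : ∀ (i : Int) (d : PySem.Dict String Int) (s : Option Int × Bool),
    (PySem.List.enumerate L i).foldl (fun st p => (pvAStepD st.1 p.2, pvAStepY st.2 p)) (d, s)
    = (L.foldl pvAStepD d, (PySem.List.enumerate L i).foldl pvAStepY s) := by
  induction L with
  | nil => intro i d s; simp [PySem.List.enumerate_nil]
  | cons c t ih => intro i d s; simp [PySem.List.enumerate_cons, ih]

-- once the flag is down the y state is frozen
theorem pv_yfrozen (e : List (Int × Char)) (o : Option Int) :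
    e.foldl pvAStepY (o, false) = (o, false) := by
  induction e with
  | nil => rfl
  | cons p t ih => simp [pvAStepY, ih]

-- A's y fold computes the first index of 'y'
theorem pv_yfold (L : List Char) : ∀ (i : Int),
    (PySem.List.enumerate L i).foldl pvAStepY (none, true)
    = (match PySem.List.index? L 'y' with
       | none => ((none : Option Int), true)
       | some n => (some (i + n), false)) := by
  induction L with
  | nil => intro i; rfl
  | cons c t ih =>
    intro i
    rw [PySem.List.enumerate_cons]
    by_cases hc : c = 'y'
    · subst hc
      rw [List.foldl_cons]
      have h1 : pvAStepY (none, true) (i, 'y') = (some i, false) := by simp [pvAStepY]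
      rw [h1, pv_yfrozen, PySem.List.index?_cons_self]
      simp
    · rw [List.foldl_cons]
      have h1 : pvAStepY (none, true) (i, c) = (none, true) := by simp [pvAStepY, hc]
      rw [h1, ih, PySem.List.index?_cons_of_ne t hc]
      cases PySem.List.index? t 'y' with
      | none => rfl
      | some n =>
        simp only [Option.map_some]
        have : i + 1 + (n : Int) = i + ((n : Int) + 1) := by ring
        simp [this]

-- a singleton is a prefix exactly when it is the head
theorem pv_singleton_prefix (c : Char) (t : List Char) : [c] <+: t ↔ t.head? = some c := by
  cases t with
  | nil => simp
  | cons x xs =>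
    constructor
    · rintro ⟨u, hu⟩; cases hu; rfl
    · intro h; simp at h; subst h; exact ⟨xs, rfl⟩

-- B's find-based option equals the first index of 'y'
theorem pv_find_eq_index (L : List Char) :
    (if (PySem.Chars.find L ['y'] == -1) = true then (none : Option Int) else some (PySem.Chars.find L ['y']))
    = (PySem.List.index? L 'y').map (fun n => (n : Int)) := by
  cases h : PySem.List.index? L 'y' with
  | none =>
    have hy : 'y' ∉ L := (PySem.List.index?_eq_none_iff L 'y').mp h
    have : PySem.Chars.find L ['y'] = -1 := by
      rw [PySem.Chars.find_eq_neg_one_iff]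
      intro hin
      exact hy (by simpa using hin.mem (by simp))
    simp [this]
  | some n =>
    obtain ⟨hn, hval, hmin⟩ := PySem.List.getElem_of_index?_eq_some h
    have hinf : (['y'] : List Char) <:+: L := by
      have : 'y' ∈ L := hval ▸ List.getElem_mem hn
      obtain ⟨s1, s2, hs⟩ := List.append_of_mem this
      exact ⟨s1, s2, by simp [hs]⟩
    have hpos : 0 ≤ PySem.Chars.find L ['y'] := (PySem.Chars.find_nonneg_iff L ['y']).mpr hinf
    obtain ⟨hpre, hmin'⟩ := PySem.Chars.find_spec hpos
    have hgetf : L[(PySem.Chars.find L ['y']).toNat]? = some 'y' := by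
      rw [← List.head?_drop]
      exact (pv_singleton_prefix 'y' _).mp hpre
    have h1 : ¬ ((PySem.Chars.find L ['y']).toNat < n) := by
      intro hlt
      obtain ⟨_, hv⟩ := List.getElem?_eq_some_iff.mp hgetf
      exact hmin _ hlt hv
    have h2 : ¬ (n < (PySem.Chars.find L ['y']).toNat) := by
      intro hlt
      exact hmin' n hlt ((pv_singleton_prefix 'y' _).mpr (by rw [List.head?_drop, List.getElem?_eq_getElem hn, hval]))
    have heq : (PySem.Chars.find L ['y']).toNat = n := by omega
    have hfind : PySem.Chars.find L ['y'] = (n : Int) := by omega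
    simp [hfind]

-- A's two-step body collapses to a single insert of the incremented count
theorem pv_astep_eq (d : PySem.Dict String Int) (c : Char) :
    pvAStepD d c = d.insert (pvStr1 c) (d.getD (pvStr1 c) 0 + 1) := by
  unfold pvAStepD
  by_cases h : d.contains (pvStr1 c) = false
  · rw [if_pos h]
    show (d.insert (pvStr1 c) 0).insert (pvStr1 c)
        ((d.insert (pvStr1 c) 0).getD (pvStr1 c) 0 + 1) = _
    rw [PySem.Dict.getD_insert_self, PySem.Dict.insert_insert_self,
        PySem.Dict.getD_of_not_contains _ _ h]
  · rw [if_neg h]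

-- inserting at a key already present commutes with inserting at a different key
theorem pv_insert_comm (D : PySem.Dict String Int) (k x : String) (w u : Int)
    (hk : D.contains k = true) (hne : k ≠ x) :
    (D.insert x u).insert k w = (D.insert k w).insert x u := by
  apply PySem.Dict.ext
  have hk' : (D.insert x u).contains k = true := by
    rw [PySem.Dict.contains_insert]; simp [hk]
  by_cases hx : D.contains x = true
  · have hx' : (D.insert k w).contains x = true := by
      rw [PySem.Dict.contains_insert]; simp [hx]
    rw [PySem.Dict.items_insert_of_contains _ _ hk', PySem.Dict.items_insert_of_contains _ _ hx,
        PySem.Dict.items_insert_of_contains _ _ hx', PySem.Dict.items_insert_of_contains _ _ hk,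
        List.map_map, List.map_map]
    apply List.map_congr_left
    intro p _
    by_cases h1 : p.1 = x <;> by_cases h2 : p.1 = k <;>
      simp [Function.comp, h1, h2, hne, Ne.symm hne]
  · have hxf : D.contains x = false := by simpa using hx
    have hx' : (D.insert k w).contains x = false := by
      rw [PySem.Dict.contains_insert]; simp [hxf, Ne.symm hne]
    rw [PySem.Dict.items_insert_of_contains _ _ hk',
        PySem.Dict.items_insert_of_not_contains _ _ hxf,
        PySem.Dict.items_insert_of_not_contains _ _ hx',
        PySem.Dict.items_insert_of_contains _ _ hk,
        List.map_append]
    simp [Ne.symm hne]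

-- pulling the single visit of a present key k out of a nodup fold of inserts
theorem pv_pull (f : String → Int) (m : List String) : ∀ (D : PySem.Dict String Int) (k : String),
    m.Nodup → D.contains k = true →
    m.foldl (fun d x => d.insert x (d.getD x 0 + f x)) D
    = (PySem.Set.discard m k).foldl (fun d x => d.insert x (d.getD x 0 + f x))
        (if k ∈ m then D.insert k (D.getD k 0 + f k) else D) := by
  induction m with
  | nil => intro D k _ _; simp [PySem.Set.discard]
  | cons x t ih =>
    intro D k hnd hk
    obtain ⟨hxt, hnd'⟩ := List.nodup_cons.mp hnd
    by_cases hxk : x = k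
    · subst hxk
      have hkt : x ∉ t := hxt
      rw [List.foldl_cons, ih (D.insert x (D.getD x 0 + f x)) x hnd'
            (by rw [PySem.Dict.contains_insert]; simp)]
      simp [PySem.Set.discard, hkt]
    · rw [List.foldl_cons,
          ih (D.insert x (D.getD x 0 + f x)) k hnd'
            (by rw [PySem.Dict.contains_insert]; simp [hk])]
      have hdis : PySem.Set.discard (x :: t) k = x :: PySem.Set.discard t k := by
        simp [PySem.Set.discard, hxk]
      rw [hdis, List.foldl_cons]
      by_cases hkt : k ∈ t
      · simp only [hkt, if_pos, List.mem_cons, or_true, if_pos]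
        rw [PySem.Dict.getD_insert_of_ne _ _ _ (Ne.symm hxk),
            pv_insert_comm D k x _ _ hk (Ne.symm hxk),
            PySem.Dict.getD_insert_of_ne _ _ _ hxk]
      · have hkx : ¬ k = x := fun hh => hxk hh.symm
        simp [hkt, hkx]

-- main dict lemma: one bump per occurrence = one insert of the total count per distinct key
theorem pv_main (ks : List String) : ∀ (d : PySem.Dict String Int),
    ks.foldl (fun d x => d.insert x (d.getD x 0 + 1)) d
    = (PySem.Set.ofList ks).foldl (fun d x => d.insert x (d.getD x 0 + (List.count x ks : Int))) d := by
  induction ks with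
  | nil => intro d; rfl
  | cons k t ih =>
    intro d
    rw [List.foldl_cons, ih, PySem.Set.ofList_cons, List.foldl_cons]
    have hcongr : ∀ (acc : PySem.Dict String Int), ∀ x ∈ PySem.Set.discard (PySem.Set.ofList t) k,
        acc.insert x (acc.getD x 0 + (List.count x (k :: t) : Int))
        = acc.insert x (acc.getD x 0 + (List.count x t : Int)) := by
      intro acc x hx
      have hxk : x ≠ k := ((PySem.Set.mem_discard _ _ _).mp hx).2
      rw [List.count_cons_of_ne (Ne.symm hxk)]
    rw [PySem.List.foldl_congr_mem _ _ _ _ hcongr]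
    rw [pv_pull (fun x => (List.count x t : Int)) (PySem.Set.ofList t)
          (d.insert k (d.getD k 0 + 1)) k (PySem.Set.nodup_ofList t) (PySem.Dict.contains_insert_self _ _ _)]
    by_cases hkt : k ∈ t
    · have hmem : k ∈ PySem.Set.ofList t := (PySem.Set.mem_ofList _ _).mpr hkt
      rw [if_pos hmem, PySem.Dict.getD_insert_self, PySem.Dict.insert_insert_self,
          List.count_cons_self]
      push_cast; ring_nf
    · have hmem : k ∉ PySem.Set.ofList t := fun h => hkt ((PySem.Set.mem_ofList _ _).mp h)
      have hcnt : List.count k t = 0 := List.count_eq_zero.mpr hkt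
      rw [if_neg hmem, List.count_cons_self, hcnt]
      norm_num

-- ===== VERDICT (by name: the statement is the Claim_ definition above) =====
theorem getCountAndFirstYPos_spec : Claim_equal_getCountAndFirstYPos := by
  intro pattern pattern_dict _
  simp only [Spec_getCountAndFirstYPos, getCountAndFirstYPos, getCountAndFirstYPos_alt]
  rw [pv_split]
  refine Prod.ext ?_ ?_
  · -- dict component
    show (pattern.toList.foldl pvAStepD (PySem.Dict.mk pattern_dict)).items = _
    have hA : pattern.toList.foldl pvAStepD (PySem.Dict.mk pattern_dict)
        = (pattern.toList.map pvStr1).foldl (fun d x => d.insert x (d.getD x 0 + 1))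
            (PySem.Dict.mk pattern_dict) := by
      rw [List.foldl_map]
      exact PySem.List.foldl_congr_mem _ _ _ _ (fun acc x _ => pv_astep_eq acc x)
    have hC : pattern.toList.foldl
          (fun d ch => d.insert (pvStr1 ch) (d.getD (pvStr1 ch) 0 + 1)) PySem.Dict.empty
        = PySem.Dict.counter (pattern.toList.map pvStr1) := by
      rw [← PySem.Dict.foldl_insert_getD_add_one_eq_counter, List.foldl_map]
    rw [hA, hC, pv_main]
    rw [PySem.Dict.items_counter, List.foldl_map]
  · -- y component
    show ((PySem.List.enumerate pattern.toList 0).foldl pvAStepY (none, true)).1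
      = (if (PySem.Str.find pattern "y" == -1) = true then none
         else some (PySem.Str.find pattern "y"))
    have hstr : PySem.Str.find pattern "y" = PySem.Chars.find pattern.toList ['y'] := by
      simp [PySem.Str.find_eq]
    rw [hstr, pv_yfold, pv_find_eq_index]
    cases PySem.List.index? pattern.toList 'y' <;> simp
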